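-- pv_equiv track=rewrite | github.com/JaylenBradley/Pittsburgh-Pirates-Arm-Angle-Research | scripts/generate_results_csv.py | merge_shoulder_elbow_data
-- ===== SOURCE A (Python) =====
-- def merge_shoulder_elbow_data(frame_data_list):
--     """
--     Merge shoulder and elbow calculations for the same frames.
--
--     Some frames may have been calculated with both shoulder and elbow joints.
--     This function combines them into single rows.
--
--     Args:
--         frame_data_list: List of frame data dictionaries
--
--     Returns:
--         List of merged frame data dictionaries
--     """
--     # Group by (video_id, frame_name)
--     frame_map = {}
--
--     for entry in frame_data_list:
--         key = (entry['video_id'], entry['frame_name'])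
--
--         if key not in frame_map:
--             frame_map[key] = entry.copy()
--         else:
--             # Merge angles if not N/A
--             existing = frame_map[key]
--             if entry['pitcher_angle_shoulder_wrist'] != 'N/A':
--                 existing['pitcher_angle_shoulder_wrist'] = entry['pitcher_angle_shoulder_wrist']
--             if entry['pitcher_angle_elbow_wrist'] != 'N/A':
--                 existing['pitcher_angle_elbow_wrist'] = entry['pitcher_angle_elbow_wrist']
--
--     # Convert back to list and sort
--     merged_list = list(frame_map.values())
--     merged_list.sort(key=lambda x: (x['video_id'], x['frame_name']))
--
--     return merged_list
-- ===== SOURCE B (Python) =====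
-- def merge_shoulder_elbow_data(frame_data_list):
--     """Merge shoulder and elbow calculations for the same frames.
--
--     Two-phase group-by: collect the distinct (video_id, frame_name) keys in
--     first-occurrence order, then reduce each key's group of entries directly.
--     """
--     keys = [(e['video_id'], e['frame_name']) for e in frame_data_list]
--     merged_list = []
--     for key in dict.fromkeys(keys):
--         group = [e for e in frame_data_list
--                  if (e['video_id'], e['frame_name']) == key]
--         merged = dict(group[0])
--         for e in group[1:]:
--             if e['pitcher_angle_shoulder_wrist'] != 'N/A':
--                 merged['pitcher_angle_shoulder_wrist'] = e['pitcher_angle_shoulder_wrist']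
--             if e['pitcher_angle_elbow_wrist'] != 'N/A':
--                 merged['pitcher_angle_elbow_wrist'] = e['pitcher_angle_elbow_wrist']
--         merged_list.append(merged)
--     merged_list.sort(key=lambda x: (x['video_id'], x['frame_name']))
--     return merged_list
-- ===== Notes on version B (the rewrite author's own statement) =====
-- stated objective: alternative
-- what changed: Replaces A's single-pass incremental dict merging with a two-phase group-by: first collect the distinct (video_id, frame_name) keys in first-occurrence order, then reduce each key's group of entries with a fold, and sort the results; no frame map is maintained.
import Mathlib
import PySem

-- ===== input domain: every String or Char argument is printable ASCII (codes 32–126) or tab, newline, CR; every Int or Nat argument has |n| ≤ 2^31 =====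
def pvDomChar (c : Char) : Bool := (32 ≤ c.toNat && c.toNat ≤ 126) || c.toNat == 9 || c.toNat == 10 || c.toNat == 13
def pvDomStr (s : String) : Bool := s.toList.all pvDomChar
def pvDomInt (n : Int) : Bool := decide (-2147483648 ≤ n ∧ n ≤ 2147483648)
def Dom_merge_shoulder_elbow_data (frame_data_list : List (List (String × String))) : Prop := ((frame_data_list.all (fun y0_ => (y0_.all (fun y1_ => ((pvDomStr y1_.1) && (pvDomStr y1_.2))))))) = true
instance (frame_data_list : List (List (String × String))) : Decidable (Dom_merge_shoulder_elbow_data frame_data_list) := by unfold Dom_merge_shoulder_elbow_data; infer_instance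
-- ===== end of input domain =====

-- B replaces A's single-pass incremental dict merging with a two-phase group-by
-- (distinct keys in first-occurrence order, then a fold over each key's group); objective: alternative.

-- ===== PORT A =====
-- shared helpers: entry[k] (exact under Pre_, where the key is present), the grouping key, and the merge block
def pvGet (e : List (String × String)) (k : String) : String :=
  PySem.Dict.getD (PySem.Dict.mk e) k ""
def pvKey (e : List (String × String)) : String × String :=
  (pvGet e "video_id", pvGet e "frame_name")
def pvMergeInto (ex e : List (String × String)) : List (String × String) :=
  let ex1 := if pvGet e "pitcher_angle_shoulder_wrist" ≠ "N/A"
    then (PySem.Dict.insert (PySem.Dict.mk ex) "pitcher_angle_shoulder_wrist" (pvGet e "pitcher_angle_shoulder_wrist")).items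
    else ex
  if pvGet e "pitcher_angle_elbow_wrist" ≠ "N/A"
    then (PySem.Dict.insert (PySem.Dict.mk ex1) "pitcher_angle_elbow_wrist" (pvGet e "pitcher_angle_elbow_wrist")).items
    else ex1

-- the body of A's grouping loop
def pvStepA (d : PySem.Dict (String × String) (List (String × String))) (entry : List (String × String)) :
    PySem.Dict (String × String) (List (String × String)) :=
  let key := pvKey entry
  if PySem.Dict.contains d key = false then
    PySem.Dict.insert d key entry
  else
    PySem.Dict.insert d key (pvMergeInto (PySem.Dict.getD d key []) entry)

def merge_shoulder_elbow_data (frame_data_list : List (List (String × String))) : List (List (String × String)) :=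
  PySem.List.sorted2 (PySem.Dict.values (frame_data_list.foldl pvStepA PySem.Dict.empty))
    (fun x => pvGet x "video_id") (fun x => pvGet x "frame_name")

-- ===== PORT B =====
-- the merged row for one key: fold the merge block over that key's group
def pvMergeGroup (l : List (List (String × String))) (key : String × String) : List (String × String) :=
  match l.filter (fun e => pvKey e == key) with
  | [] => []                        -- unreachable: key comes from l
  | g0 :: rest => rest.foldl pvMergeInto g0

def merge_shoulder_elbow_data_alt (frame_data_list : List (List (String × String))) : List (List (String × String)) :=
  PySem.List.sorted2 ((PySem.List.dedup (frame_data_list.map pvKey)).map (pvMergeGroup frame_data_list))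
    (fun x => pvGet x "video_id") (fun x => pvGet x "frame_name")

-- ===== PRECONDITION & SPEC =====
def pvHasKey (e : List (String × String)) (k : String) : Bool :=
  (PySem.Dict.get? (PySem.Dict.mk e) k).isSome

-- Pre_ excludes exactly the inputs on which the Python A raises KeyError: an entry without
-- 'video_id'/'frame_name', or a later entry of an already-seen key without one of the two angle fields.
def Pre_merge_shoulder_elbow_data (frame_data_list : List (List (String × String))) : Prop :=
  (∀ e ∈ frame_data_list, pvHasKey e "video_id" = true ∧ pvHasKey e "frame_name" = true) ∧
  List.Pairwise (fun a b => pvKey a = pvKey b →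
    pvHasKey b "pitcher_angle_shoulder_wrist" = true ∧ pvHasKey b "pitcher_angle_elbow_wrist" = true)
    frame_data_list
instance (frame_data_list : List (List (String × String))) : Decidable (Pre_merge_shoulder_elbow_data frame_data_list) := by unfold Pre_merge_shoulder_elbow_data; infer_instance

def pvWitness_merge_shoulder_elbow_data : (List (List (String × String))) :=
  [[("video_id", "v1"), ("frame_name", "f1"),
    ("pitcher_angle_shoulder_wrist", "41.5"), ("pitcher_angle_elbow_wrist", "N/A")],
   [("video_id", "v1"), ("frame_name", "f1"),
    ("pitcher_angle_shoulder_wrist", "N/A"), ("pitcher_angle_elbow_wrist", "12.0")]]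

def Spec_merge_shoulder_elbow_data (frame_data_list : List (List (String × String))) (out : List (List (String × String))) : Prop := out = merge_shoulder_elbow_data_alt frame_data_list
instance (frame_data_list : List (List (String × String))) (out : List (List (String × String))) : Decidable (Spec_merge_shoulder_elbow_data frame_data_list out) := by unfold Spec_merge_shoulder_elbow_data; infer_instance

-- ===== CLAIM (what is proved, stated in full; the proofs are below) =====
def Claim_equal_merge_shoulder_elbow_data : Prop := ∀ (frame_data_list : List (List (String × String))), Dom_merge_shoulder_elbow_data frame_data_list → Pre_merge_shoulder_elbow_data frame_data_list → Spec_merge_shoulder_elbow_data frame_data_list (merge_shoulder_elbow_data frame_data_list)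

-- ===== LEMMAS AND PROOFS =====

-- first-match lookup in a table keyed by ks: every hit for `key` carries the value `f key`
lemma get?_table (ks : List (String × String)) (f : String × String → List (String × String)) (key : String × String) :
    (PySem.Dict.mk (ks.map (fun k => (k, f k)))).get? key = if key ∈ ks then some (f key) else none := by
  induction ks with
  | nil => rfl
  | cons k t ih =>
    rw [List.map_cons, PySem.Dict.get?_mk_cons, ih]
    by_cases h : k = key
    · simp [h]
    · have h' : ¬ key = k := fun hc => h hc.symm
      simp [h, h']

lemma contains_table (ks : List (String × String)) (f : String × String → List (String × String)) (key : String × String) :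
    (PySem.Dict.mk (ks.map (fun k => (k, f k)))).contains key = decide (key ∈ ks) := by
  rw [PySem.Dict.contains_eq_isSome_get?, get?_table]
  by_cases h : key ∈ ks <;> simp [h]

-- overwriting a present key rewrites exactly its cell of the table
lemma insert_table (ks : List (String × String)) (f : String × String → List (String × String))
    (key : String × String) (v : List (String × String)) (h : key ∈ ks) :
    (PySem.Dict.mk (ks.map (fun k => (k, f k)))).insert key v
      = PySem.Dict.mk (ks.map (fun k => (k, if k = key then v else f k))) := by
  apply PySem.Dict.ext
  rw [PySem.Dict.items_insert_of_contains _ _ (by rw [contains_table]; simpa)]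
  show (ks.map (fun k => (k, f k))).map _ = _
  rw [List.map_map]
  apply List.map_congr_left
  intro k _
  by_cases hk : k = key <;> simp [hk]

lemma mem_dedup_iff (xs : List (String × String)) (y : String × String) :
    y ∈ PySem.List.dedup xs ↔ y ∈ xs := PySem.Set.mem_ofList xs y

lemma filter_key_ne_nil (l : List (List (String × String))) (key : String × String)
    (h : key ∈ l.map pvKey) : l.filter (fun e => pvKey e == key) ≠ [] := by
  obtain ⟨a, ha, hk⟩ := List.mem_map.mp h
  intro hnil
  have : a ∈ l.filter (fun e => pvKey e == key) := List.mem_filter.mpr ⟨ha, by simp [hk]⟩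
  simp [hnil] at this

lemma mergeGroup_append_ne (l : List (List (String × String))) (e : List (String × String))
    (k : String × String) (hk : k ≠ pvKey e) :
    pvMergeGroup (l ++ [e]) k = pvMergeGroup l k := by
  unfold pvMergeGroup
  rw [List.filter_append]
  have hb : (pvKey e == k) = false := by simp [Ne.symm hk]
  rw [List.filter_singleton, hb, cond_false, List.append_nil]

lemma mergeGroup_append_self (l : List (List (String × String))) (e : List (String × String))
    (h : pvKey e ∈ l.map pvKey) :
    pvMergeGroup (l ++ [e]) (pvKey e) = pvMergeInto (pvMergeGroup l (pvKey e)) e := by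
  unfold pvMergeGroup
  rw [List.filter_append]
  have he : [e].filter (fun e' => pvKey e' == pvKey e) = [e] := by
    rw [List.filter_singleton, beq_self_eq_true, cond_true]
  rw [he]
  obtain ⟨g0, rest, hg⟩ := List.exists_cons_of_ne_nil (filter_key_ne_nil l (pvKey e) h)
  rw [hg]
  simp [List.foldl_append]

lemma mergeGroup_append_fresh (l : List (List (String × String))) (e : List (String × String))
    (h : pvKey e ∉ l.map pvKey) :
    pvMergeGroup (l ++ [e]) (pvKey e) = e := by
  unfold pvMergeGroup
  rw [List.filter_append]
  have h0 : l.filter (fun e' => pvKey e' == pvKey e) = [] := by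
    rw [List.filter_eq_nil_iff]
    intro a ha
    simp only [beq_iff_eq]
    exact fun hc => h (List.mem_map.mpr ⟨a, ha, hc⟩)
  have he : [e].filter (fun e' => pvKey e' == pvKey e) = [e] := by
    rw [List.filter_singleton, beq_self_eq_true, cond_true]
  rw [h0, he]
  rfl

-- the invariant of A's loop: the frame map IS the table of merged groups, keyed by the distinct keys in order
lemma foldA_eq (l : List (List (String × String))) :
    l.foldl pvStepA PySem.Dict.empty
      = PySem.Dict.mk ((PySem.List.dedup (l.map pvKey)).map (fun k => (k, pvMergeGroup l k))) := by
  induction l using List.reverseRecOn with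
  | nil => rfl
  | append_singleton l e ih =>
    rw [List.foldl_append, List.foldl_cons, List.foldl_nil, ih]
    unfold pvStepA
    rw [List.map_append, List.map_cons, List.map_nil]
    show (if _ = false then _ else _) = _
    rw [contains_table]
    by_cases hk : pvKey e ∈ l.map pvKey
    · -- seen key: merge into its cell
      rw [if_neg (by simp [hk])]
      rw [PySem.Dict.getD_eq_get?_getD, get?_table,
        if_pos ((mem_dedup_iff _ _).mpr hk)]
      rw [insert_table _ _ _ _ ((mem_dedup_iff _ _).mpr hk)]
      have hded : PySem.List.dedup (l.map pvKey ++ [pvKey e]) = PySem.List.dedup (l.map pvKey) := by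
        rw [show PySem.List.dedup = @PySem.Set.ofList _ _ from rfl, PySem.Set.ofList_append_singleton]
        exact PySem.Set.add_of_mem ((PySem.Set.mem_ofList _ _).mpr hk)
      rw [hded]
      congr 1
      apply List.map_congr_left
      intro k hkmem
      have hkmem' : k ∈ l.map pvKey := (mem_dedup_iff _ _).mp hkmem
      by_cases hke : k = pvKey e
      · subst hke
        simp [mergeGroup_append_self l e hkmem']
      · simp [hke, mergeGroup_append_ne l e k hke]
    · -- fresh key: append a new cell
      rw [if_pos (by simp [hk])]
      have hfresh : PySem.List.dedup (l.map pvKey ++ [pvKey e]) = PySem.List.dedup (l.map pvKey) ++ [pvKey e] := by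
        rw [show PySem.List.dedup = @PySem.Set.ofList _ _ from rfl, PySem.Set.ofList_append_singleton]
        exact PySem.Set.add_of_not_mem (fun hmem => hk ((PySem.Set.mem_ofList _ _).mp hmem))
      rw [hfresh]
      apply PySem.Dict.ext
      rw [PySem.Dict.items_insert_of_not_contains _ _ (by rw [contains_table]; simp [hk])]
      show (_ ++ _) = List.map _ (_ ++ [_])
      rw [List.map_append, List.map_cons, List.map_nil]
      congr 1
      · apply List.map_congr_left
        intro k hkmem
        have hkmem' : k ∈ l.map pvKey := (mem_dedup_iff _ _).mp hkmem
        have hke : k ≠ pvKey e := fun hc => hk (hc ▸ hkmem')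
        rw [mergeGroup_append_ne l e k hke]
      · rw [mergeGroup_append_fresh l e hk]

-- ===== VERDICT (by name: the statement is the Claim_ definition above) =====
theorem merge_shoulder_elbow_data_spec : Claim_equal_merge_shoulder_elbow_data := by
  intro l _hdom _hpre
  show merge_shoulder_elbow_data l = merge_shoulder_elbow_data_alt l
  unfold merge_shoulder_elbow_data merge_shoulder_elbow_data_alt
  rw [foldA_eq, PySem.Dict.values_mk, List.map_map]
  rfl
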